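-- pv_equiv track=rewrite | github.com/mahtabsoin/jobs | src/ats_builder/docs.py | detect_sections
-- ===== SOURCE A (Python) =====
-- from typing import Dict, List, Tuple
--
-- SECTION_ALIASES = {
--     "experience": {"experience", "work experience", "professional experience", "employment"},
--     "education": {"education", "academics"},
--     "skills": {"skills", "technical skills", "core skills", "tooling"},
--     "certifications": {"certifications", "certification", "licenses"},
--     "projects": {"projects", "selected projects"},
-- }
--
-- def detect_sections(lines: List[str]) -> Dict[str, Tuple[int, int]]:
--     # Return mapping section_key -> (start_idx, end_idx)
--     idxs: Dict[str, Tuple[int, int]] = {}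
--     headings: List[Tuple[str, int]] = []
--     for i, ln in enumerate(lines):
--         clean = ln.strip().lower().strip(" :")
--         for key, aliases in SECTION_ALIASES.items():
--             if clean in aliases or any(clean.startswith(a + ":") for a in aliases):
--                 headings.append((key, i))
--     # Add sentinel end
--     headings.sort(key=lambda x: x[1])
--     for j, (key, start) in enumerate(headings):
--         end = headings[j + 1][1] if j + 1 < len(headings) else len(lines)
--         idxs[key] = (start + 1, end)
--     return idxs
-- ===== SOURCE B (Python) =====
-- # Flat first-match alias table + single streaming pass with a pending heading:
-- # no headings list, no sort, no index lookahead.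
-- ALIAS_PAIRS = [
--     ("experience", "experience"), ("work experience", "experience"),
--     ("professional experience", "experience"), ("employment", "experience"),
--     ("education", "education"), ("academics", "education"),
--     ("skills", "skills"), ("technical skills", "skills"),
--     ("core skills", "skills"), ("tooling", "skills"),
--     ("certifications", "certifications"), ("certification", "certifications"),
--     ("licenses", "certifications"),
--     ("projects", "projects"), ("selected projects", "projects"),
-- ]
--
-- def _match_key(clean):
--     for a, k in ALIAS_PAIRS:
--         if clean == a or clean.startswith(a + ":"):
--             return k
--     return None
--
-- def detect_sections(lines):
--     idxs = {}
--     pending = None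
--     for i, ln in enumerate(lines):
--         key = _match_key(ln.strip().lower().strip(" :"))
--         if key is not None:
--             if pending is not None:
--                 idxs[pending[0]] = (pending[1] + 1, i)
--             pending = (key, i)
--     if pending is not None:
--         idxs[pending[0]] = (pending[1] + 1, len(lines))
--     return idxs
-- ===== Notes on version B (the rewrite author's own statement) =====
-- stated objective: faster
-- what changed: B replaces A's three phases (collect headings while scanning every key's alias set per line, sort them, then a second indexed loop with a lookahead) by a flat alias-to-key table scanned for the first match (early exit) plus a single streaming pass that keeps one pending heading and closes it at the next heading or end of input.
import Mathlib
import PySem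

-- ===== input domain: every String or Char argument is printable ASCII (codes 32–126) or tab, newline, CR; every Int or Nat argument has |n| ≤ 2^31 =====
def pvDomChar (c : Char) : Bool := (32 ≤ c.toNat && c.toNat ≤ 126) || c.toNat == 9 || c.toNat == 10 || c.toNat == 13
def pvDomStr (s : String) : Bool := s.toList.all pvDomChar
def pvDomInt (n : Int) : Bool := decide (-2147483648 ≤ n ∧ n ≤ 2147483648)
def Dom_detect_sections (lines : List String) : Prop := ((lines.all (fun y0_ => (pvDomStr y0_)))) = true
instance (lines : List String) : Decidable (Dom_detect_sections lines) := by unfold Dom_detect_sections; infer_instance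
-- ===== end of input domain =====

-- B replaces A's collect-headings/sort/index-lookahead passes by a flat first-match alias
-- table and ONE streaming pass holding a pending heading; return values proved equal.

-- ===== PORT A =====
def pvSectionAliases : List (String × List String) :=
  [("experience", ["experience", "work experience", "professional experience", "employment"]),
   ("education", ["education", "academics"]),
   ("skills", ["skills", "technical skills", "core skills", "tooling"]),
   ("certifications", ["certifications", "certification", "licenses"]),
   ("projects", ["projects", "selected projects"])]

-- ln.strip().lower().strip(" :")  (shared by both Pythons, identical expression)
def pvClean (ln : String) : String :=
  PySem.Str.stripChars (PySem.Str.lower (PySem.Str.strip ln)) " :"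

def detect_sections (lines : List String) : List (String × Int × Int) :=
  let headings : List (String × Int) :=
    (PySem.List.enumerate lines 0).foldl (fun acc p =>
      let clean := pvClean p.2
      pvSectionAliases.foldl (fun acc2 ka =>
        if ka.2.contains clean || ka.2.any (fun a => PySem.Str.startswith clean (a ++ ":")) then
          acc2 ++ [(ka.1, p.1)]
        else acc2) acc) []
  let headings2 := PySem.List.sorted headings (fun x => x.2) false
  ((PySem.List.enumerate headings2 0).foldl (fun (d : PySem.Dict String (Int × Int)) q =>
      d.insert q.2.1 (q.2.2 + 1,
        if q.1 + 1 < (headings2.length : Int)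
        then (PySem.List.pyGetD headings2 (q.1 + 1) ("", 0)).2
        else (lines.length : Int))) PySem.Dict.empty).items

-- ===== PORT B =====
def pvAliasPairs : List (String × String) :=
  [("experience", "experience"), ("work experience", "experience"),
   ("professional experience", "experience"), ("employment", "experience"),
   ("education", "education"), ("academics", "education"),
   ("skills", "skills"), ("technical skills", "skills"),
   ("core skills", "skills"), ("tooling", "skills"),
   ("certifications", "certifications"), ("certification", "certifications"),
   ("licenses", "certifications"),
   ("projects", "projects"), ("selected projects", "projects")]

-- first-match scan of the flat alias table (Source B's _match_key early-return loop)
def pvMatchKey (clean : String) : Option String :=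
  pvAliasPairs.findSome? (fun ak =>
    if clean == ak.1 || PySem.Str.startswith clean (ak.1 ++ ":") then some ak.2 else none)

def detect_sections_alt (lines : List String) : List (String × Int × Int) :=
  let st := (PySem.List.enumerate lines 0).foldl
    (fun (st : PySem.Dict String (Int × Int) × Option (String × Int)) p =>
      match pvMatchKey (pvClean p.2) with
      | none => st
      | some key =>
        (match st.2 with
         | none => st.1
         | some pk => st.1.insert pk.1 (pk.2 + 1, p.1),
         some (key, p.1)))
    (PySem.Dict.empty, none)
  match st.2 with
  | none => st.1.items
  | some pk => (st.1.insert pk.1 (pk.2 + 1, (lines.length : Int))).items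

-- ===== PRECONDITION & SPEC =====
def Spec_detect_sections (lines : List String) (out : List (String × Int × Int)) : Prop := out = detect_sections_alt lines
instance (lines : List String) (out : List (String × Int × Int)) : Decidable (Spec_detect_sections lines out) := by unfold Spec_detect_sections; infer_instance

-- ===== CLAIM (what is proved, stated in full; the proofs are below) =====
def Claim_equal_detect_sections : Prop := ∀ (lines : List String), Dom_detect_sections lines → Spec_detect_sections lines (detect_sections lines)

-- ===== LEMMAS AND PROOFS =====

-- the part of s before the first ':' (everything, if there is no ':')
theorem pv_tw_all (a : List Char) (h : ∀ c ∈ a, c ≠ ':') :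
    a.takeWhile (fun c => !(c == ':')) = a := by
  induction a with
  | nil => rfl
  | cons x t ih =>
    have hx : x ≠ ':' := h x (by simp)
    simp [hx, ih (fun c hc => h c (by simp [hc]))]

theorem pv_tw_append (a l : List Char) (h : ∀ c ∈ a, c ≠ ':') :
    (a ++ l).takeWhile (fun c => !(c == ':')) = a ++ l.takeWhile (fun c => !(c == ':')) := by
  induction a with
  | nil => rfl
  | cons x t ih =>
    have hx : x ≠ ':' := h x (by simp)
    simp [hx, ih (fun c hc => h c (by simp [hc]))]

theorem pv_head_iff (a s : List Char) (ha : ∀ c ∈ a, c ≠ ':') :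
    (s = a ∨ a ++ [':'] <+: s) ↔ s.takeWhile (fun c => !(c == ':')) = a := by
  constructor
  · rintro (h | ⟨t, ht⟩)
    · rw [h]; exact pv_tw_all a ha
    · rw [← ht, List.append_assoc, pv_tw_append a _ ha]
      simp
  · intro h
    rcases hd : s.dropWhile (fun c => !(c == ':')) with _ | ⟨c, t⟩
    · left
      have := List.takeWhile_append_dropWhile (p := fun c => !(c == ':')) (l := s)
      rw [h, hd] at this
      simpa using this.symm
    · right
      have hc : (!(c == ':')) = false := by
        have := List.head_dropWhile_not (p := fun c => !(c == ':')) (l := s)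
        simp [hd] at this
        simpa using this
      have hc' : c = ':' := by simpa using hc
      have := List.takeWhile_append_dropWhile (p := fun c => !(c == ':')) (l := s)
      rw [h, hd, hc'] at this
      exact ⟨t, by rw [← this]; simp⟩

def pvHead (s : String) : List Char := s.toList.takeWhile (fun c => !(c == ':'))

theorem pv_cond (a : String) (ha : ∀ c ∈ a.toList, c ≠ ':') (clean : String) :
    (clean == a || PySem.Str.startswith clean (a ++ ":")) = decide (pvHead clean = a.toList) := by
  rw [Bool.eq_iff_iff]
  simp only [Bool.or_eq_true, beq_iff_eq, PySem.Str.startswith_eq, PySem.Chars.startswith_iff,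
    decide_eq_true_eq, pvHead]
  rw [← pv_head_iff a.toList clean.toList ha]
  constructor
  · rintro (h | h)
    · left; rw [h]
    · right; simpa [List.append_assoc] using h
  · rintro (h | h)
    · left; exact String.toList_inj.mp h
    · right; simpa [List.append_assoc] using h

theorem pv_cond' (a : String) (ha : ∀ c ∈ a.toList, c ≠ ':') (clean : String) :
    (clean = a ∨ PySem.Str.startswith clean (a ++ ":") = true) ↔ pvHead clean = a.toList := by
  have h := pv_cond a ha clean
  rw [Bool.eq_iff_iff] at h
  simpa using h

theorem pv_group (als : List String) (ha : ∀ a ∈ als, ∀ c ∈ a.toList, c ≠ ':') (clean : String) :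
    (als.contains clean || als.any fun a => PySem.Str.startswith clean (a ++ ":"))
      = als.any (fun a => decide (pvHead clean = a.toList)) := by
  rw [Bool.eq_iff_iff]
  simp only [Bool.or_eq_true, List.any_eq_true, decide_eq_true_eq, List.contains_iff_mem]
  constructor
  · rintro (h | ⟨a, hm, h⟩)
    · exact ⟨clean, h, (pv_cond' clean (ha clean h) clean).mp (Or.inl rfl)⟩
    · exact ⟨a, hm, (pv_cond' a (ha a hm) clean).mp (Or.inr h)⟩
  · rintro ⟨a, hm, h⟩
    rcases (pv_cond' a (ha a hm) clean).mpr h with h' | h'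
    · exact Or.inl (h' ▸ hm)
    · exact Or.inr ⟨a, hm, h'⟩

set_option maxRecDepth 8192 in
theorem pv_perline (clean : String) (i : Int) (acc : List (String × Int)) :
    pvSectionAliases.foldl (fun acc2 ka =>
        if ka.2.contains clean || ka.2.any (fun a => PySem.Str.startswith clean (a ++ ":")) then
          acc2 ++ [(ka.1, i)]
        else acc2) acc
      = acc ++ ((pvMatchKey clean).map (fun k => (k, i))).toList := by
  simp only [pvMatchKey, pvAliasPairs, List.findSome?_cons, List.findSome?_nil]
  rw [pv_cond "experience" (by simp) clean]
  rw [pv_cond "work experience" (by simp) clean]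
  rw [pv_cond "professional experience" (by simp) clean]
  rw [pv_cond "employment" (by simp) clean]
  rw [pv_cond "education" (by simp) clean]
  rw [pv_cond "academics" (by simp) clean]
  rw [pv_cond "skills" (by simp) clean]
  rw [pv_cond "technical skills" (by simp) clean]
  rw [pv_cond "core skills" (by simp) clean]
  rw [pv_cond "tooling" (by simp) clean]
  rw [pv_cond "certifications" (by simp) clean]
  rw [pv_cond "certification" (by simp) clean]
  rw [pv_cond "licenses" (by simp) clean]
  rw [pv_cond "projects" (by simp) clean]
  rw [pv_cond "selected projects" (by simp) clean]
  simp only [pvSectionAliases, List.foldl_cons, List.foldl_nil]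
  rw [pv_group _ (by simp) clean, pv_group _ (by simp) clean, pv_group _ (by simp) clean,
    pv_group _ (by simp) clean, pv_group _ (by simp) clean]
  generalize pvHead clean = h
  by_cases h1 : h = "experience".toList
  · simp [h1]
  by_cases h2 : h = "work experience".toList
  · simp [h2]
  by_cases h3 : h = "professional experience".toList
  · simp [h3]
  by_cases h4 : h = "employment".toList
  · simp [h4]
  by_cases h5 : h = "education".toList
  · simp [h5]
  by_cases h6 : h = "academics".toList
  · simp [h6]
  by_cases h7 : h = "skills".toList
  · simp [h7]
  by_cases h8 : h = "technical skills".toList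
  · simp [h8]
  by_cases h9 : h = "core skills".toList
  · simp [h9]
  by_cases h10 : h = "tooling".toList
  · simp [h10]
  by_cases h11 : h = "certifications".toList
  · simp [h11]
  by_cases h12 : h = "certification".toList
  · simp [h12]
  by_cases h13 : h = "licenses".toList
  · simp [h13]
  by_cases h14 : h = "projects".toList
  · simp [h14]
  by_cases h15 : h = "selected projects".toList
  · simp [h15]
  simp_all

-- the matched headings of a line list: (key, line index) pairs, in line order
def pvG (p : Int × String) : Option (String × Int) :=
  (pvMatchKey (pvClean p.2)).map (fun k => (k, p.1))

def pvMatches (lines : List String) : List (String × Int) :=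
  (PySem.List.enumerate lines 0).filterMap pvG

-- A's first loop collects exactly the matches, in order
theorem pv_headings_aux (xs : List (Int × String)) :
    ∀ (acc : List (String × Int)),
    xs.foldl (fun acc p =>
      let clean := pvClean p.2
      pvSectionAliases.foldl (fun acc2 ka =>
        if ka.2.contains clean || ka.2.any (fun a => PySem.Str.startswith clean (a ++ ":")) then
          acc2 ++ [(ka.1, p.1)]
        else acc2) acc) acc
      = acc ++ xs.filterMap pvG := by
  induction xs with
  | nil => intro acc; simp
  | cons x t ih =>
    intro acc
    rw [List.foldl_cons]
    show t.foldl _ (pvSectionAliases.foldl _ acc) = _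
    rw [pv_perline (pvClean x.2) x.1 acc, ih]
    cases hg : pvMatchKey (pvClean x.2) <;> simp [pvG, hg]

theorem pv_headings (lines : List String) :
    (PySem.List.enumerate lines 0).foldl (fun acc p =>
      let clean := pvClean p.2
      pvSectionAliases.foldl (fun acc2 ka =>
        if ka.2.contains clean || ka.2.any (fun a => PySem.Str.startswith clean (a ++ ":")) then
          acc2 ++ [(ka.1, p.1)]
        else acc2) acc) []
      = pvMatches lines := by
  rw [pv_headings_aux (PySem.List.enumerate lines 0) []]
  rfl

-- the match list is (weakly) increasing in its line indices, so A's sort is the identity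
theorem pv_matches_pairwise (lines : List String) :
    (pvMatches lines).Pairwise (fun x y => x.2 ≤ y.2) := by
  have h := PySem.List.pairwise_lt_enumerate lines 0
  refine List.pairwise_filterMap.mpr (h.imp ?_)
  intro p q hpq b hb b' hb'
  simp only [pvG, Option.map_eq_some_iff] at hb hb'
  obtain ⟨k, _, rfl⟩ := hb
  obtain ⟨k', _, rfl⟩ := hb'
  exact le_of_lt hpq

def pvIns (d : PySem.Dict String (Int × Int)) (pe : (String × Int) × Int) :
    PySem.Dict String (Int × Int) :=
  d.insert pe.1.1 (pe.1.2 + 1, pe.2)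

-- A's lookahead loop over the (sorted=unchanged) match list, as a zip with the successor indices
theorem pv_finalA_aux (L : Int) (M : List (String × Int)) :
    ∀ (tl : List (String × Int)) (s : Nat), M.drop s = tl →
    ∀ (d : PySem.Dict String (Int × Int)),
    (PySem.List.enumerate tl (s : Int)).foldl (fun d q =>
        d.insert q.2.1 (q.2.2 + 1,
          if q.1 + 1 < (M.length : Int) then (PySem.List.pyGetD M (q.1 + 1) ("", 0)).2 else L)) d
      = (tl.zip (tl.tail.map (·.2) ++ [L])).foldl pvIns d := by
  intro tl
  induction tl with
  | nil => intro s _ d; simp [PySem.List.enumerate_nil]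
  | cons m t ih =>
    intro s hdrop d
    have hs : s < M.length := by
      by_contra hle
      rw [List.drop_eq_nil_of_le (by omega)] at hdrop
      exact (List.cons_ne_nil m t) hdrop.symm
    have hlen : M.length = s + t.length + 1 := by
      have := congrArg List.length hdrop
      simp [List.length_drop] at this
      omega
    rw [PySem.List.enumerate_cons, List.foldl_cons]
    cases t with
    | nil =>
      have hcond : ¬ ((s : Int) + 1 < (M.length : Int)) := by
        simp only [hlen, List.length_nil]; push_cast; omega
      simp only [if_neg hcond, PySem.List.enumerate_nil, List.foldl_nil]
      simp [pvIns]
    | cons q tt =>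
      have hcond : (s : Int) + 1 < (M.length : Int) := by
        simp only [hlen, List.length_cons]; push_cast; omega
      have hdrop' : M.drop (s + 1) = q :: tt := by
        rw [← List.tail_drop, hdrop]; rfl
      have hget : PySem.List.pyGetD M ((s : Int) + 1) ("", 0) = q := by
        have hcast : (s : Int) + 1 = ((s + 1 : Nat) : Int) := by push_cast; ring
        rw [hcast, PySem.List.pyGetD_natCast]
        have : M[s+1]? = some q := by
          have h0 : (M.drop (s+1))[0]? = some q := by rw [hdrop']; rfl
          rwa [List.getElem?_drop, Nat.add_zero] at h0
        simp [List.getD, this]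
      rw [if_pos hcond, hget]
      have hstep := ih (s + 1) hdrop' (d.insert m.1 (m.2 + 1, q.2))
      have hcast : ((s + 1 : Nat) : Int) = (s : Int) + 1 := by push_cast; ring
      rw [hcast] at hstep
      rw [hstep]
      simp [pvIns]

-- B's streaming step on the match list
def pvStep (st : PySem.Dict String (Int × Int) × Option (String × Int)) (kp : String × Int) :
    PySem.Dict String (Int × Int) × Option (String × Int) :=
  (match st.2 with
   | none => st.1
   | some pk => st.1.insert pk.1 (pk.2 + 1, kp.2),
   some kp)

-- B's loop over the lines is its loop over the match list
theorem pv_foldB (xs : List (Int × String)) (st : PySem.Dict String (Int × Int) × Option (String × Int)) :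
    xs.foldl (fun st p =>
      match pvMatchKey (pvClean p.2) with
      | none => st
      | some key =>
        (match st.2 with
         | none => st.1
         | some pk => st.1.insert pk.1 (pk.2 + 1, p.1),
         some (key, p.1))) st
      = (xs.filterMap pvG).foldl pvStep st := by
  induction xs generalizing st with
  | nil => rfl
  | cons x t ih =>
    cases hk : pvMatchKey (pvClean x.2) <;>
      simp [List.foldl_cons, hk, pvG, ih, pvStep]

-- B's pending-heading fold produces the same insert sequence as A's lookahead fold
theorem pv_finalB_aux (L : Int) :
    ∀ (M : List (String × Int)) (d : PySem.Dict String (Int × Int)) (p : String × Int),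
    (match (M.foldl pvStep (d, some p)).2 with
     | none => (M.foldl pvStep (d, some p)).1.items
     | some pk => ((M.foldl pvStep (d, some p)).1.insert pk.1 (pk.2 + 1, L)).items)
      = (((p :: M).zip (M.map (·.2) ++ [L])).foldl pvIns d).items := by
  intro M
  induction M with
  | nil => intro d p; simp [pvIns]
  | cons q t ih =>
    intro d p
    rw [List.foldl_cons]
    have hstep : pvStep (d, some p) q = (d.insert p.1 (p.2 + 1, q.2), some q) := rfl
    rw [hstep, ih]
    simp [pvIns]

-- the two finalization passes agree on any match list
theorem pv_final_eq (L : Int) (M : List (String × Int)) :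
    ((PySem.List.enumerate M 0).foldl (fun d q =>
        d.insert q.2.1 (q.2.2 + 1,
          if q.1 + 1 < (M.length : Int) then (PySem.List.pyGetD M (q.1 + 1) ("", 0)).2 else L))
        PySem.Dict.empty).items
      = (match (M.foldl pvStep (PySem.Dict.empty, none)).2 with
         | none => (M.foldl pvStep (PySem.Dict.empty, none)).1.items
         | some pk => ((M.foldl pvStep (PySem.Dict.empty, none)).1.insert pk.1 (pk.2 + 1, L)).items) := by
  have hA := pv_finalA_aux L M M 0 rfl PySem.Dict.empty
  simp only [Nat.cast_zero] at hA
  rw [hA]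
  cases M with
  | nil => rfl
  | cons m t =>
    rw [List.foldl_cons]
    have hstep : pvStep (PySem.Dict.empty, none) m = (PySem.Dict.empty, some m) := rfl
    rw [hstep, pv_finalB_aux L t PySem.Dict.empty m]
    rfl

theorem detect_sections_spec : Claim_equal_detect_sections := by
  intro lines _
  unfold Spec_detect_sections detect_sections detect_sections_alt
  simp only [pv_headings lines,
    PySem.List.sorted_eq_self_of_pairwise (pvMatches lines) (fun x => x.2) (pv_matches_pairwise lines), pv_foldB]
  exact pv_final_eq (lines.length : Int) (pvMatches lines)
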